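-- pv_equiv track=rewrite | github.com/rex0988476/osu-taiko-Beatmap-Image-Converter | OTBIC_app.py | to_kiai_offset_pair
-- ===== SOURCE A (Python) =====
-- def to_kiai_offset_pair(kiai_sv_list):
--     sv_kiai_offset_pair_list=[]
--     i=0
--     while i+1<len(kiai_sv_list):
--         sv_kiai_offset_pair_list.append({"start_offset":kiai_sv_list[i]['offset'],"end_offset":kiai_sv_list[i+1]['offset']})
--         i+=2
--     if len(kiai_sv_list)%2==1:
--         sv_kiai_offset_pair_list.append({"start_offset":kiai_sv_list[i]['offset'],"end_offset":-1})
--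
--     return sv_kiai_offset_pair_list
-- ===== SOURCE B (Python) =====
-- def to_kiai_offset_pair(kiai_sv_list):
--     result = []
--     pending = None  # (offset,) waiting for its partner
--     for sv in kiai_sv_list:
--         offset = sv['offset']
--         if pending is None:
--             pending = (offset,)
--         else:
--             result.append({"start_offset": pending[0], "end_offset": offset})
--             pending = None
--     if pending is not None:
--         result.append({"start_offset": pending[0], "end_offset": -1})
--     return result
-- ===== Notes on version B (the rewrite author's own statement) =====
-- stated objective: alternative
-- what changed: Replaced the index-stepping while-loop (i += 2 with random access kiai_sv_list[i], kiai_sv_list[i+1]) plus a separate length-parity branch by a one-element-at-a-time state-machine fold: a 'pending' register holds an unpaired start offset, each element either fills the register or flushes it as a pair, and a final flush emits the -1-terminated odd tail.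
import Mathlib
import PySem

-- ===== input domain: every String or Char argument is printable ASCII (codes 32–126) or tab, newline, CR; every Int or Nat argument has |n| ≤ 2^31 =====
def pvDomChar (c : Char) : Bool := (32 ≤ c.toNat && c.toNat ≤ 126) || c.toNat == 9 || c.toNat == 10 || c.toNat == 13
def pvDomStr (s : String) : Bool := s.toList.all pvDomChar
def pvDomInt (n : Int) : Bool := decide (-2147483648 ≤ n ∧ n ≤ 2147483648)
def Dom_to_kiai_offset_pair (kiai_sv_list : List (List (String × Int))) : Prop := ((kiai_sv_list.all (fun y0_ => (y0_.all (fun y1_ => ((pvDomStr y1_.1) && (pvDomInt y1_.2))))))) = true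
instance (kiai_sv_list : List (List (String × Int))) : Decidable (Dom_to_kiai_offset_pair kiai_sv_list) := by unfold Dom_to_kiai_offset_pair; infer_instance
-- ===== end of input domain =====

-- B replaces A's index-stride while-loop (i += 2, random access, parity branch) by a
-- one-element-at-a-time state-machine fold with a 'pending' start-offset register.
-- NOTE: under Pre_ every dict has key "offset", so Dict.getD … 0 below is exactly Python's d['offset'].

-- ===== PORT A =====
-- A's while-loop consumes two elements per iteration (i += 2); the odd trailing
-- element gets end_offset -1.  The obvious structural recursion over the same state:
def to_kiai_offset_pair (kiai_sv_list : List (List (String × Int))) : List (List (String × Int)) :=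
  match kiai_sv_list with
  | [] => []
  | [a] => [[("start_offset", PySem.Dict.getD (PySem.Dict.mk a) "offset" 0), ("end_offset", (-1 : Int))]]
  | a :: b :: rest =>
      [("start_offset", PySem.Dict.getD (PySem.Dict.mk a) "offset" 0),
       ("end_offset", PySem.Dict.getD (PySem.Dict.mk b) "offset" 0)] :: to_kiai_offset_pair rest

-- ===== PORT B =====
-- the fold body: either stash the offset in the pending register or flush a pair
def pvStep (st : List (List (String × Int)) × Option Int) (sv : List (String × Int)) :
    List (List (String × Int)) × Option Int :=
  let offset := PySem.Dict.getD (PySem.Dict.mk sv) "offset" 0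
  match st.2 with
  | none => (st.1, some offset)
  | some p => (st.1 ++ [[("start_offset", p), ("end_offset", offset)]], none)

def to_kiai_offset_pair_alt (kiai_sv_list : List (List (String × Int))) : List (List (String × Int)) :=
  let st := kiai_sv_list.foldl pvStep ([], none)
  match st.2 with
  | none => st.1
  | some p => st.1 ++ [[("start_offset", p), ("end_offset", (-1 : Int))]]

-- ===== PRECONDITION & SPEC =====
-- Pre_ excludes exactly the inputs where Python A raises KeyError: a dict without the key "offset".
def Pre_to_kiai_offset_pair (kiai_sv_list : List (List (String × Int))) : Prop :=
  ∀ d ∈ kiai_sv_list, ((PySem.Dict.mk d).get? "offset").isSome = true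
instance (kiai_sv_list : List (List (String × Int))) : Decidable (Pre_to_kiai_offset_pair kiai_sv_list) := by unfold Pre_to_kiai_offset_pair; infer_instance

def pvWitness_to_kiai_offset_pair : (List (List (String × Int))) :=
  [[("offset", 100)], [("offset", 250)], [("offset", 400)]]

def Spec_to_kiai_offset_pair (kiai_sv_list : List (List (String × Int))) (out : List (List (String × Int))) : Prop := out = to_kiai_offset_pair_alt kiai_sv_list
instance (kiai_sv_list : List (List (String × Int))) (out : List (List (String × Int))) : Decidable (Spec_to_kiai_offset_pair kiai_sv_list out) := by unfold Spec_to_kiai_offset_pair; infer_instance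

-- ===== CLAIM (what is proved, stated in full; the proofs are below) =====
def Claim_equal_to_kiai_offset_pair : Prop := ∀ (kiai_sv_list : List (List (String × Int))), Dom_to_kiai_offset_pair kiai_sv_list → Pre_to_kiai_offset_pair kiai_sv_list → Spec_to_kiai_offset_pair kiai_sv_list (to_kiai_offset_pair kiai_sv_list)

-- ===== LEMMAS AND PROOFS =====
-- invariant of B's fold started with an empty register: it appends A's result to the accumulator
lemma fold_invariant (xs : List (List (String × Int))) : ∀ (acc : List (List (String × Int))),
    (match (xs.foldl pvStep (acc, none)).2 with
     | none => (xs.foldl pvStep (acc, none)).1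
     | some p => (xs.foldl pvStep (acc, none)).1 ++ [[("start_offset", p), ("end_offset", (-1 : Int))]])
    = acc ++ to_kiai_offset_pair xs := by
  induction xs using to_kiai_offset_pair.induct with
  | case1 => intro acc; simp [to_kiai_offset_pair]
  | case2 a => intro acc; simp [to_kiai_offset_pair, pvStep]
  | case3 a b rest ih =>
      intro acc
      simp only [List.foldl_cons, pvStep, to_kiai_offset_pair]
      rw [ih]
      simp

lemma ports_agree (xs : List (List (String × Int))) :
    to_kiai_offset_pair xs = to_kiai_offset_pair_alt xs := by
  unfold to_kiai_offset_pair_alt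
  have h := fold_invariant xs []
  simp only [List.nil_append] at h
  exact h.symm

-- ===== VERDICT (by name: the statement is the Claim_ definition above) =====
theorem to_kiai_offset_pair_spec : Claim_equal_to_kiai_offset_pair := by
  intro xs _ _
  unfold Spec_to_kiai_offset_pair
  exact ports_agree xs
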